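-- pv_equiv track=rewrite | github.com/map-A/TIMU | LCContest/zsyh_1.py | deleteText
-- ===== SOURCE A (Python) =====
-- def deleteText(article: str, index: int) -> str:
--     a = article.split(" ")
--     start = 0
--     for i in range(len(a)):
--         if(start<=index<start+len(a[i])):
--             a.pop(i)
--             break
--         elif index== start+len(a[i]):
--             break
--         else:
--             start+=len(a[i])+1
--     ret = ""
--     for i in range(len(a)-1):
--         ret+=a[i]
--         ret+=" "
--     if(len(a)>0):
--         ret+=a[len(a)-1]
--     return ret
-- ===== SOURCE B (Python) =====
-- def deleteText(article: str, index: int) -> str: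
--     if not (0 <= index < len(article)) or article[index] == ' ':
--         return article
--     left = article.rfind(' ', 0, index) + 1
--     right = article.find(' ', index)
--     if right != -1:
--         return article[:left] + article[right + 1:]
--     return article[:left - 1] if left > 0 else ""
-- ===== Notes on version B (the rewrite author's own statement) =====
-- stated objective: simpler
-- what changed: Drops the split-into-word-list / offset-accumulating loop with pop and manual rejoin; B works on the raw string, locating the enclosing word's boundaries with rfind/find and returning a concatenation of two slices.
import Mathlib
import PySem

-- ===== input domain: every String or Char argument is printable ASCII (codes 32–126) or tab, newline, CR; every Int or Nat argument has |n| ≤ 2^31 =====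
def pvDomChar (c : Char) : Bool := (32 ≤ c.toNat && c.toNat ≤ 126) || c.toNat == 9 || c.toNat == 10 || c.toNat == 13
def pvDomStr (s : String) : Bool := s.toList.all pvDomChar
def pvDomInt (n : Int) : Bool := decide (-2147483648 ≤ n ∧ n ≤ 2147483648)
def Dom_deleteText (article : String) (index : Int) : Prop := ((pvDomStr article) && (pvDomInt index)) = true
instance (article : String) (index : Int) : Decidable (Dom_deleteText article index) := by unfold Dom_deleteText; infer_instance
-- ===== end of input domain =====

-- B replaces A's word-list bookkeeping (split, offset loop with pop, manual rejoin) by rfind/find boundary search and slicing; objective: simpler. Return-value equivalence (neither mutates).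

-- ===== PORT A =====
-- first loop of A: scan words with running offset `start`, pop the word containing `index`, break on a boundary hit
def pvFindPop (a : List (List Char)) (index : Int) (start : Int) : List (List Char) :=
  match a with
  | [] => []
  | w :: rest =>
    if start ≤ index ∧ index < start + (w.length : Int) then rest
    else if index = start + (w.length : Int) then w :: rest
    else w :: pvFindPop rest index (start + (w.length : Int) + 1)

-- second loop of A: ret += a[i] + " " for all but the last word, then append the last word if any
def pvJoinLoop (a : List (List Char)) : List Char :=
  match a with
  | [] => []
  | [w] => w
  | w :: rest => w ++ ' ' :: pvJoinLoop rest

def deleteText (article : String) (index : Int) : String :=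
  String.ofList (pvJoinLoop (pvFindPop (PySem.Chars.splitOn article.toList [' ']) index 0))

-- ===== PORT B =====
def pvDelCore (cs : List Char) (index : Int) : List Char :=
  if ¬(0 ≤ index ∧ index < (cs.length : Int)) then cs
  else if PySem.List.pyGet? cs index = some ' ' then cs
  else
    let left := PySem.Chars.rfindFrom cs [' '] 0 (some index) + 1
    let right := PySem.Chars.findFrom cs [' '] index none
    if right ≠ -1 then
      PySem.Chars.slice cs none (some left) ++ PySem.Chars.slice cs (some (right + 1)) none
    else if left > 0 then PySem.Chars.slice cs none (some (left - 1)) else []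

def deleteText_alt (article : String) (index : Int) : String :=
  String.ofList (pvDelCore article.toList index)

-- ===== PRECONDITION & SPEC =====
def Spec_deleteText (article : String) (index : Int) (out : String) : Prop := out = deleteText_alt article index
instance (article : String) (index : Int) (out : String) : Decidable (Spec_deleteText article index out) := by unfold Spec_deleteText; infer_instance

-- ===== CLAIM (what is proved, stated in full; the proofs are below) =====
def Claim_equal_deleteText : Prop := ∀ (article : String) (index : Int), Dom_deleteText article index → Spec_deleteText article index (deleteText article index)

-- ===== LEMMAS AND PROOFS =====

-- reference splitter: accumulate the current word `pre`, emit on each space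
def pvSplitSp (pre : List Char) : List Char → List (List Char)
  | [] => [pre]
  | c :: rest => if c = ' ' then pre :: pvSplitSp [] rest else pvSplitSp (pre ++ [c]) rest

-- index of the first space, if any
def pvFF : List Char → Option Nat
  | [] => none
  | c :: t => if c = ' ' then some 0 else (pvFF t).map (· + 1)

-- index of the last space, if any
def pvRL : List Char → Option Nat
  | [] => none
  | c :: t =>
    match pvRL t with
    | some j => some (j + 1)
    | none => if c = ' ' then some 0 else none

-- clean normal form of B's in-range, non-space branch
def pvC (cs : List Char) (k : Nat) : List Char :=
  match pvFF (cs.drop k), pvRL (cs.take k) with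
  | some r, some l => cs.take (l + 1) ++ cs.drop (k + r + 1)
  | some r, none => cs.drop (k + r + 1)
  | none, some l => cs.take l
  | none, none => []

theorem pvJoinLoop_cons (w : List Char) (l : List (List Char)) :
    pvJoinLoop (w :: l) = if l = [] then w else w ++ ' ' :: pvJoinLoop l := by
  cases l <;> simp [pvJoinLoop]

theorem pvFindPop_cons (w : List Char) (rest : List (List Char)) (idx st : Int) :
    pvFindPop (w :: rest) idx st =
      if st ≤ idx ∧ idx < st + (w.length : Int) then rest
      else if idx = st + (w.length : Int) then w :: rest
      else w :: pvFindPop rest idx (st + (w.length : Int) + 1) := rfl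

theorem pvSplitSp_ne_nil (cs : List Char) : ∀ pre, pvSplitSp pre cs ≠ [] := by
  induction cs with
  | nil => intro pre; simp [pvSplitSp]
  | cons c rest ih =>
    intro pre
    simp only [pvSplitSp]
    split
    · simp
    · exact ih _

theorem pvJoinLoop_splitSp (cs : List Char) : ∀ pre, pvJoinLoop (pvSplitSp pre cs) = pre ++ cs := by
  induction cs with
  | nil => intro pre; simp [pvSplitSp, pvJoinLoop]
  | cons c rest ih =>
    intro pre
    by_cases hc : c = ' '
    · subst hc
      have e : pvSplitSp pre (' ' :: rest) = pre :: pvSplitSp [] rest := by simp [pvSplitSp]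
      rw [e, pvJoinLoop_cons, if_neg (pvSplitSp_ne_nil rest []), ih []]
      simp
    · have e : pvSplitSp pre (c :: rest) = pvSplitSp (pre ++ [c]) rest := by simp [pvSplitSp, hc]
      rw [e, ih (pre ++ [c])]
      simp

theorem pvSplitSp_no_space {w : List Char} (hw : ' ' ∉ w) : ∀ pre rest,
    pvSplitSp pre (w ++ ' ' :: rest) = (pre ++ w) :: pvSplitSp [] rest := by
  induction w with
  | nil => intro pre rest; simp [pvSplitSp]
  | cons a t ih =>
    intro pre rest
    have ha : a ≠ ' ' := fun h => hw (by simp [h])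
    have ht : ' ' ∉ t := fun h => hw (by simp [h])
    have e : pvSplitSp pre ((a :: t) ++ ' ' :: rest) = pvSplitSp (pre ++ [a]) (t ++ ' ' :: rest) := by
      simp [pvSplitSp, ha]
    rw [e, ih ht (pre ++ [a]) rest]
    simp

theorem pvSplitSp_all_no_space {cs : List Char} (h : ' ' ∉ cs) : ∀ pre, pvSplitSp pre cs = [pre ++ cs] := by
  induction cs with
  | nil => intro pre; simp [pvSplitSp]
  | cons c rest ih =>
    intro pre
    have hc : c ≠ ' ' := fun hh => h (by simp [hh])
    have hr : ' ' ∉ rest := fun hh => h (by simp [hh])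
    have e : pvSplitSp pre (c :: rest) = pvSplitSp (pre ++ [c]) rest := by simp [pvSplitSp, hc]
    rw [e, ih hr (pre ++ [c])]
    simp

theorem pvIsPrefixOf_space (l : List Char) : ([' '].isPrefixOf l) = (l[0]? == some ' ') := by
  cases l with
  | nil => simp [List.isPrefixOf]
  | cons c t =>
    by_cases h : c = ' '
    · subst h; simp [List.isPrefixOf]
    · simp [List.isPrefixOf, h, Ne.symm h]

theorem pvSplitOn_go_eq : ∀ (fuel : Nat) (l cur : List Char) (acc : List (List Char)),
    l.length < fuel →
    PySem.Chars.splitOn.go [' '] fuel l cur acc = acc.reverse ++ pvSplitSp cur.reverse l := by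
  intro fuel
  induction fuel with
  | zero => intro l cur acc h; omega
  | succ n ih =>
    intro l cur acc h
    cases l with
    | nil => simp [PySem.Chars.splitOn.go, pvSplitSp]
    | cons c rest =>
      by_cases hc : c = ' '
      · subst hc
        have hpre : [' '].isPrefixOf (' ' :: rest) = true := by
          rw [pvIsPrefixOf_space]; simp
        simp only [PySem.Chars.splitOn.go, hpre, if_pos, List.length_cons, List.drop_succ_cons,
          List.length_nil, List.drop_zero]
        rw [ih rest [] ((cur.reverse) :: acc) (by simp at h; omega)]
        have e : pvSplitSp cur.reverse (' ' :: rest) = cur.reverse :: pvSplitSp [] rest := by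
          simp [pvSplitSp]
        rw [e]
        simp
      · have hpre : [' '].isPrefixOf (c :: rest) = false := by
          rw [pvIsPrefixOf_space]; simp [hc, Ne.symm hc]
        simp only [PySem.Chars.splitOn.go, hpre, Bool.false_eq_true, if_false]
        rw [ih rest (c :: cur) acc (by simp at h ⊢; omega)]
        have e : pvSplitSp cur.reverse (c :: rest) = pvSplitSp (cur.reverse ++ [c]) rest := by
          simp [pvSplitSp, hc]
        rw [e]
        simp

theorem pvSplitOn_eq (cs : List Char) : PySem.Chars.splitOn cs [' '] = pvSplitSp [] cs := by
  unfold PySem.Chars.splitOn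
  rw [pvSplitOn_go_eq (cs.length + 1) cs [] [] (by omega)]
  simp

theorem pvSplitSp_two_of_mem {cs : List Char} (h : ' ' ∈ cs) : ∀ pre, 2 ≤ (pvSplitSp pre cs).length := by
  induction cs with
  | nil => simp at h
  | cons c rest ih =>
    intro pre
    by_cases hc : c = ' '
    · subst hc
      have e : pvSplitSp pre (' ' :: rest) = pre :: pvSplitSp [] rest := by simp [pvSplitSp]
      rw [e]
      have h1 : pvSplitSp [] rest ≠ [] := pvSplitSp_ne_nil rest []
      have h2 : 1 ≤ (pvSplitSp [] rest).length := List.length_pos_iff.mpr h1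
      simp only [List.length_cons]
      omega
    · have hr : ' ' ∈ rest := by
        rcases List.mem_cons.mp h with h1 | h1
        · exact absurd h1.symm hc
        · exact h1
      have e : pvSplitSp pre (c :: rest) = pvSplitSp (pre ++ [c]) rest := by simp [pvSplitSp, hc]
      rw [e]
      exact ih hr _

theorem pvFindPop_shift (a : List (List Char)) (idx : Int) (d : Int) : ∀ st : Int,
    pvFindPop a (idx + d) (st + d) = pvFindPop a idx st := by
  induction a with
  | nil => intro st; simp [pvFindPop]
  | cons w rest ih =>
    intro st
    simp only [pvFindPop]
    by_cases h1 : st ≤ idx ∧ idx < st + (w.length : Int)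
    · rw [if_pos (by omega), if_pos h1]
    · rw [if_neg (by omega), if_neg h1]
      by_cases h2 : idx = st + (w.length : Int)
      · rw [if_pos (by omega), if_pos h2]
      · rw [if_neg (by omega), if_neg h2]
        have hrec := ih (st + (w.length : Int) + 1)
        have harg : st + (w.length : Int) + 1 + d = st + d + (w.length : Int) + 1 := by ring
        rw [harg] at hrec
        rw [hrec]

theorem pvFindPop_neg (a : List (List Char)) : ∀ {idx st : Int}, idx < st → pvFindPop a idx st = a := by
  induction a with
  | nil => intro idx st _; simp [pvFindPop]
  | cons w rest ih =>
    intro idx st h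
    have hL : (0 : Int) ≤ (w.length : Int) := Int.natCast_nonneg _
    simp only [pvFindPop]
    rw [if_neg (by omega), if_neg (by omega), ih (by omega)]

theorem pvFindPop_ge (a : List (List Char)) : ∀ {idx st : Int},
    st + ((pvJoinLoop a).length : Int) ≤ idx → pvFindPop a idx st = a := by
  induction a with
  | nil => intro idx st _; simp [pvFindPop]
  | cons w rest ih =>
    intro idx st h
    cases rest with
    | nil =>
      have h' : st + (w.length : Int) ≤ idx := by simpa [pvJoinLoop] using h
      rw [pvFindPop_cons, if_neg (by omega)]
      by_cases h2 : idx = st + (w.length : Int)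
      · rw [if_pos h2]
      · rw [if_neg h2]
        simp [pvFindPop]
    | cons y ys =>
      have hlen : (pvJoinLoop (w :: y :: ys)).length = w.length + 1 + (pvJoinLoop (y :: ys)).length := by
        show (w ++ ' ' :: pvJoinLoop (y :: ys)).length = _
        simp only [List.length_append, List.length_cons]
        omega
      rw [hlen] at h
      rw [pvFindPop_cons, if_neg (by push_cast at h ⊢; omega), if_neg (by push_cast at h ⊢; omega),
        ih (by push_cast at h ⊢; omega)]

theorem pvFindPop_length (a : List (List Char)) (idx : Int) : ∀ st : Int,
    a.length - 1 ≤ (pvFindPop a idx st).length := by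
  induction a with
  | nil => intro st; simp [pvFindPop]
  | cons w rest ih =>
    intro st
    simp only [pvFindPop]
    split
    · simp
    · split
      · simp
      · have := ih (st + (w.length : Int) + 1)
        simp only [List.length_cons]
        omega

theorem pvFF_none_iff (l : List Char) : pvFF l = none ↔ ' ' ∉ l := by
  induction l with
  | nil => simp [pvFF]
  | cons c t ih =>
    by_cases hc : c = ' '
    · subst hc; simp [pvFF]
    · simp [pvFF, hc, Option.map_eq_none_iff, ih, Ne.symm hc]

theorem pvFF_append {w : List Char} (hw : ' ' ∉ w) (rest : List Char) :
    pvFF (w ++ ' ' :: rest) = some w.length := by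
  induction w with
  | nil => simp [pvFF]
  | cons a t ih =>
    have ha : a ≠ ' ' := fun h => hw (by simp [h])
    have ht : ' ' ∉ t := fun h => hw (by simp [h])
    have e : pvFF ((a :: t) ++ ' ' :: rest) = (pvFF (t ++ ' ' :: rest)).map (· + 1) := by
      simp [pvFF, ha]
    rw [e, ih ht]
    simp

theorem pvRL_none_iff (l : List Char) : pvRL l = none ↔ ' ' ∉ l := by
  induction l with
  | nil => simp [pvRL]
  | cons c t ih =>
    simp only [pvRL]
    cases h : pvRL t with
    | some j =>
      have hmem : ' ' ∈ t := by
        by_contra hmem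
        rw [ih.mpr hmem] at h
        simp at h
      simp [hmem]
    | none =>
      have ht : ' ' ∉ t := ih.mp h
      by_cases hc : c = ' '
      · subst hc; simp
      · simp [hc, ht, Ne.symm hc]

theorem pvRL_append (l1 l2 : List Char) :
    pvRL (l1 ++ ' ' :: l2) =
      some (match pvRL l2 with | some j => l1.length + 1 + j | none => l1.length) := by
  induction l1 with
  | nil =>
    simp only [List.nil_append, pvRL]
    cases h : pvRL l2 with
    | none => simp
    | some j => simp; ring
  | cons c t ih =>
    have e : pvRL ((c :: t) ++ ' ' :: l2)
        = match pvRL (t ++ ' ' :: l2) with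
          | some j => some (j + 1)
          | none => if c = ' ' then some 0 else none := by
      simp [pvRL]
    rw [e, ih]
    cases h : pvRL l2 with
    | none => simp
    | some j => simp; ring

theorem pvRL_append_last (xs : List Char) (c : Char) :
    pvRL (xs ++ [c]) = if c = ' ' then some xs.length else pvRL xs := by
  induction xs with
  | nil =>
    simp only [List.nil_append, pvRL]
    by_cases hc : c = ' ' <;> simp [hc]
  | cons x t ih =>
    have e : pvRL ((x :: t) ++ [c])
        = match pvRL (t ++ [c]) with
          | some j => some (j + 1)
          | none => if x = ' ' then some 0 else none := by
      simp [pvRL]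
    rw [e, ih]
    by_cases hc : c = ' '
    · simp [hc]
    · simp only [if_neg hc]
      rfl

theorem pvFind_go_eq (l : List Char) : ∀ k : Nat,
    PySem.Chars.find.go [' '] l k = (match pvFF l with | some r => (k : Int) + r | none => -1) := by
  induction l with
  | nil => intro k; simp [PySem.Chars.find.go, pvFF]
  | cons c t ih =>
    intro k
    by_cases hc : c = ' '
    · subst hc
      have hpre : [' '].isPrefixOf (' ' :: t) = true := by rw [pvIsPrefixOf_space]; simp
      simp [PySem.Chars.find.go, hpre, pvFF]
    · have hpre : [' '].isPrefixOf (c :: t) = false := by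
        rw [pvIsPrefixOf_space]; simp [hc, Ne.symm hc]
      simp only [PySem.Chars.find.go, hpre, Bool.false_eq_true, if_false]
      rw [ih (k + 1)]
      have e : pvFF (c :: t) = (pvFF t).map (· + 1) := by simp [pvFF, hc]
      rw [e]
      cases h : pvFF t <;> simp <;> push_cast <;> ring

theorem pvFind_eq (l : List Char) :
    PySem.Chars.find l [' '] = (match pvFF l with | some r => (r : Int) | none => -1) := by
  unfold PySem.Chars.find
  rw [pvFind_go_eq l 0]
  cases h : pvFF l <;> simp

theorem pvRfind_go_eq (l : List Char) : ∀ j : Nat,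
    PySem.Chars.rfind.go l [' '] j = (match pvRL (l.take (j + 1)) with | some i => (i : Int) | none => -1) := by
  intro j
  induction j with
  | zero =>
    cases l with
    | nil =>
      simp only [PySem.Chars.rfind.go]
      rw [pvIsPrefixOf_space]
      simp [pvRL]
    | cons c t =>
      simp only [PySem.Chars.rfind.go]
      rw [pvIsPrefixOf_space]
      by_cases hc : c = ' '
      · subst hc; simp [pvRL]
      · simp [hc, pvRL, Ne.symm hc]
  | succ j ih =>
    simp only [PySem.Chars.rfind.go]
    have hd : (List.drop (j + 1) l)[0]? = l[j + 1]? := by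
      rw [List.getElem?_drop]
    rw [pvIsPrefixOf_space, hd]
    cases hx : l[j + 1]? with
    | none =>
      have ht : l.take (j + 1 + 1) = l.take (j + 1) := by
        rw [List.take_succ, hx]; simp
      rw [ht, ← ih]
      simp
    | some c =>
      have ht : l.take (j + 1 + 1) = l.take (j + 1) ++ [c] := by
        rw [List.take_succ, hx]; simp
      rw [ht, pvRL_append_last]
      have hlen : (l.take (j + 1)).length = j + 1 := by
        obtain ⟨hlt, -⟩ := List.getElem?_eq_some_iff.mp hx
        rw [List.length_take]
        omega
      by_cases hc : c = ' '
      · subst hc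
        rw [if_pos rfl, hlen]
        simp
      · rw [if_neg hc]
        have hbeq : (some c == some ' ') = false := by simp [hc]
        rw [hbeq]
        simp only [Bool.false_eq_true, if_false]
        exact ih

theorem pvRfind_eq (l : List Char) :
    PySem.Chars.rfind l [' '] = (match pvRL l with | some i => (i : Int) | none => -1) := by
  unfold PySem.Chars.rfind
  rw [pvRfind_go_eq l l.length, List.take_of_length_le (by omega)]

theorem pvRfindFrom_eval (cs : List Char) (k : Nat) (hk : k ≤ cs.length) :
    PySem.Chars.rfindFrom cs [' '] 0 (some (k : Int)) = PySem.Chars.rfind (cs.take k) [' '] := by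
  have hc1 : ¬((cs.length : Int) < (k : Int)) := by omega
  have hc2 : ¬((k : Int) < 0) := by omega
  have hc3 : ¬((0 : Int) < 0) := by omega
  simp only [PySem.Chars.rfindFrom, hc1, hc2, hc3, if_false, Int.toNat_zero, List.drop_zero,
    Int.toNat_natCast]
  by_cases hrf : PySem.Chars.rfind (cs.take k) [' '] = -1
  · simp [hrf]
  · simp [hrf]

theorem pvFindFrom_eval (cs : List Char) (k : Nat) (hk : k ≤ cs.length) :
    PySem.Chars.findFrom cs [' '] (k : Int) none =
      (match pvFF (cs.drop k) with | some r => ((k : Int) + r) | none => -1) := by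
  rw [PySem.Chars.findFrom_natCast cs [' '] k hk, pvFind_eq]
  cases h : pvFF (cs.drop k) with
  | none => simp
  | some r =>
    simp [show ((r : Nat) : Int) ≠ -1 from by omega]

theorem pvSlice_stop (cs : List Char) (j : Nat) : PySem.List.slice cs none (some (j : Int)) = cs.take j := by
  simp only [PySem.List.slice, PySem.List.clampIdx]
  rw [if_neg (by omega)]
  simp only [Int.toNat_natCast, Nat.sub_zero, List.drop_zero]
  rcases le_total j cs.length with h | h
  · rw [min_eq_left h]
  · rw [min_eq_right h, List.take_of_length_le (le_refl _), List.take_of_length_le h]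

theorem pvSlice_start (cs : List Char) (j : Nat) : PySem.List.slice cs (some (j : Int)) none = cs.drop j := by
  simp only [PySem.List.slice, PySem.List.clampIdx]
  rw [if_neg (by omega)]
  simp only [Int.toNat_natCast]
  rcases le_total j cs.length with h | h
  · rw [min_eq_left h]
    apply List.take_of_length_le
    rw [List.length_drop]
  · rw [min_eq_right h, Nat.sub_self]
    simp [List.drop_eq_nil_of_le h]

theorem pvDecomp (cs : List Char) : ' ' ∉ cs ∨ ∃ w rest, ' ' ∉ w ∧ cs = w ++ ' ' :: rest := by
  induction cs with
  | nil => left; simp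
  | cons c t ih =>
    by_cases hc : c = ' '
    · right; exact ⟨[], t, by simp, by simp [hc]⟩
    · rcases ih with h | ⟨w, rest, hw, rfl⟩
      · left
        simp only [List.mem_cons, not_or]
        exact ⟨Ne.symm hc, h⟩
      · right
        refine ⟨c :: w, rest, ?_, by simp⟩
        simp only [List.mem_cons, not_or]
        exact ⟨Ne.symm hc, hw⟩

theorem pvFindPop_space : ∀ (n : Nat) (cs : List Char), cs.length ≤ n → ∀ k : Nat, cs[k]? = some ' ' →
    pvFindPop (pvSplitSp [] cs) (k : Int) 0 = pvSplitSp [] cs := by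
  intro n
  induction n with
  | zero =>
    intro cs hlen k hs
    rw [List.getElem?_eq_none_iff.mpr (by omega)] at hs
    simp at hs
  | succ n ih =>
    intro cs hlen k hs
    rcases pvDecomp cs with hno | ⟨w, rest, hw, rfl⟩
    · exfalso
      obtain ⟨hlt, heq⟩ := List.getElem?_eq_some_iff.mp hs
      exact hno (heq ▸ List.getElem_mem hlt)
    · rw [pvSplitSp_no_space hw [] rest, List.nil_append]
      rcases lt_trichotomy k w.length with hkL | hkL | hkL
      · exfalso
        rw [List.getElem?_append, if_pos hkL] at hs
        obtain ⟨hlt, heq⟩ := List.getElem?_eq_some_iff.mp hs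
        exact hw (heq ▸ List.getElem_mem hlt)
      · simp only [pvFindPop]
        rw [if_neg (by push_cast; omega), if_pos (by push_cast; omega)]
      · simp only [pvFindPop]
        rw [if_neg (by push_cast; omega), if_neg (by push_cast; omega)]
        congr 1
        have hshift := pvFindPop_shift (pvSplitSp [] rest) ((k - w.length - 1 : Nat) : Int)
          ((w.length : Int) + 1) 0
        have harg1 : ((k : Nat) : Int) = ((k - w.length - 1 : Nat) : Int) + ((w.length : Int) + 1) := by
          push_cast; omega
        have harg2 : (0 : Int) + (w.length : Int) + 1 = 0 + ((w.length : Int) + 1) := by ring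
        rw [harg1, harg2, hshift]
        apply ih rest (by simp at hlen; omega) (k - w.length - 1)
        rw [List.getElem?_append_right (by omega : w.length ≤ k)] at hs
        have e : k - w.length = (k - w.length - 1) + 1 := by omega
        rw [e] at hs
        simpa using hs

theorem pvMain : ∀ (n : Nat) (cs : List Char), cs.length ≤ n → ∀ k : Nat, k < cs.length → cs[k]? ≠ some ' ' →
    pvJoinLoop (pvFindPop (pvSplitSp [] cs) (k : Int) 0) = pvC cs k := by
  intro n
  induction n with
  | zero => intro cs hlen k hk _; omega
  | succ n ih =>
    intro cs hlen k hk hsp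
    rcases pvDecomp cs with hno | ⟨w, rest, hw, rfl⟩
    · rw [pvSplitSp_all_no_space hno [], List.nil_append]
      have h1 : pvFindPop [cs] (k : Int) 0 = [] := by
        simp only [pvFindPop]
        rw [if_pos ⟨by omega, by push_cast; omega⟩]
      rw [h1]
      have hf : pvFF (cs.drop k) = none := (pvFF_none_iff _).mpr (fun hm => hno (List.mem_of_mem_drop hm))
      have hr : pvRL (cs.take k) = none := (pvRL_none_iff _).mpr (fun hm => hno (List.mem_of_mem_take hm))
      simp [pvC, hf, hr, pvJoinLoop]
    · rw [pvSplitSp_no_space hw [] rest, List.nil_append]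
      have hW : (w ++ ' ' :: rest) = (w ++ [' ']) ++ rest := by simp
      have hWlen : (w ++ [' ']).length = w.length + 1 := by simp
      have takeSplit : ∀ (m : Nat), (w ++ ' ' :: rest).take (w.length + 1 + m) = w ++ ' ' :: rest.take m := by
        intro m
        rw [hW, List.take_append, List.take_of_length_le (by rw [hWlen]; omega),
          show w.length + 1 + m - (w ++ [' ']).length = m from by rw [hWlen]; omega]
        simp
      have dropSplit : ∀ (m : Nat), (w ++ ' ' :: rest).drop (w.length + 1 + m) = rest.drop m := by
        intro m
        rw [hW, List.drop_append, List.drop_eq_nil_of_le (by rw [hWlen]; omega),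
          show w.length + 1 + m - (w ++ [' ']).length = m from by rw [hWlen]; omega]
        simp
      rcases lt_trichotomy k w.length with hkL | hkL | hkL
      · -- k inside the first word: it is popped
        have h1 : pvFindPop (w :: pvSplitSp [] rest) (k : Int) 0 = pvSplitSp [] rest := by
          simp only [pvFindPop]
          rw [if_pos ⟨by omega, by push_cast; omega⟩]
        rw [h1, pvJoinLoop_splitSp rest [], List.nil_append]
        have hdrop : (w ++ ' ' :: rest).drop k = w.drop k ++ ' ' :: rest :=
          List.drop_append_of_le_length (by omega)
        have hnos : ' ' ∉ w.drop k := fun hm => hw (List.mem_of_mem_drop hm)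
        have hf : pvFF ((w ++ ' ' :: rest).drop k) = some (w.length - k) := by
          rw [hdrop, pvFF_append hnos, List.length_drop]
        have htk : pvRL ((w ++ ' ' :: rest).take k) = none := by
          rw [List.take_append_of_le_length (by omega)]
          exact (pvRL_none_iff _).mpr (fun hm => hw (List.mem_of_mem_take hm))
        simp only [pvC, hf, htk]
        rw [show k + (w.length - k) + 1 = w.length + 1 + 0 from by omega, dropSplit 0]
        simp
      · -- k on the separating space: excluded
        exfalso
        apply hsp
        subst hkL
        rw [List.getElem?_append_right (le_refl _)]
        simp
      · -- k inside the remainder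
        have hlen2 : w.length + (rest.length + 1) ≤ n + 1 := by simpa using hlen
        have hk2 : k < w.length + (rest.length + 1) := by simpa using hk
        have hk' : k - w.length - 1 < rest.length := by omega
        have hkk : k = w.length + 1 + (k - w.length - 1) := by omega
        set k' := k - w.length - 1 with hk'def
        have hspr : rest[k']? ≠ some ' ' := by
          intro h
          apply hsp
          rw [List.getElem?_append_right (by omega : w.length ≤ k)]
          rw [show k - w.length = k' + 1 from by omega]
          simpa using h
        have h1 : pvFindPop (w :: pvSplitSp [] rest) (k : Int) 0
            = w :: pvFindPop (pvSplitSp [] rest) (k' : Int) 0 := by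
          simp only [pvFindPop]
          rw [if_neg (by push_cast; omega), if_neg (by push_cast; omega)]
          congr 1
          have hshift := pvFindPop_shift (pvSplitSp [] rest) (k' : Int) ((w.length : Int) + 1) 0
          have harg1 : ((k : Nat) : Int) = (k' : Int) + ((w.length : Int) + 1) := by push_cast; omega
          have harg2 : (0 : Int) + (w.length : Int) + 1 = 0 + ((w.length : Int) + 1) := by ring
          rw [harg1, harg2, hshift]
        rw [h1]
        have hIH := ih rest (by omega) k' hk' hspr
        have hdropk : (w ++ ' ' :: rest).drop k = rest.drop k' := by
          rw [hkk]; exact dropSplit k'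
        have htakek : (w ++ ' ' :: rest).take k = w ++ ' ' :: rest.take k' := by
          rw [hkk]; exact takeSplit k'
        rcases hf : pvFF (rest.drop k') with _ | r
        · rcases hr : pvRL (rest.take k') with _ | l
          · -- no space anywhere in rest: the token list of rest is a popped singleton
            have hnos : ' ' ∉ rest := by
              intro hm
              rcases List.mem_append.mp ((List.take_append_drop k' rest) ▸ hm) with hmm | hmm
              · exact (pvRL_none_iff _).mp hr hmm
              · exact (pvFF_none_iff _).mp hf hmm
            have hF : pvFindPop (pvSplitSp [] rest) (k' : Int) 0 = [] := by
              rw [pvSplitSp_all_no_space hnos [], List.nil_append]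
              simp only [pvFindPop]
              rw [if_pos ⟨by omega, by push_cast; omega⟩]
            rw [hF]
            simp only [pvJoinLoop, pvC, hdropk, htakek, pvRL_append, hf, hr]
            rw [List.take_append_of_le_length (le_refl _), List.take_length]
          · have hspm : ' ' ∈ rest := by
              by_contra hcon
              rw [(pvRL_none_iff _).mpr (fun hm => hcon (List.mem_of_mem_take hm))] at hr
              simp at hr
            have hFne : pvFindPop (pvSplitSp [] rest) (k' : Int) 0 ≠ [] := by
              intro h0
              have h2 := pvSplitSp_two_of_mem hspm ([] : List Char)
              have h3 := pvFindPop_length (pvSplitSp [] rest) (k' : Int) 0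
              rw [h0] at h3
              simp at h3
              omega
            rw [pvJoinLoop_cons, if_neg hFne, hIH]
            simp only [pvC, hdropk, htakek, pvRL_append, hf, hr]
            rw [takeSplit l]
        · have hspm : ' ' ∈ rest := by
            by_contra hcon
            rw [(pvFF_none_iff _).mpr (fun hm => hcon (List.mem_of_mem_drop hm))] at hf
            simp at hf
          have hFne : pvFindPop (pvSplitSp [] rest) (k' : Int) 0 ≠ [] := by
            intro h0
            have h2 := pvSplitSp_two_of_mem hspm ([] : List Char)
            have h3 := pvFindPop_length (pvSplitSp [] rest) (k' : Int) 0
            rw [h0] at h3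
            simp at h3
            omega
          rw [pvJoinLoop_cons, if_neg hFne, hIH]
          have hdropArith : (w ++ ' ' :: rest).drop (k + r + 1) = rest.drop (k' + r + 1) := by
            rw [show k + r + 1 = w.length + 1 + (k' + r + 1) from by omega]
            exact dropSplit _
          rcases hr : pvRL (rest.take k') with _ | l
          · simp only [pvC, hdropk, htakek, pvRL_append, hf, hr, hdropArith]
            have t0 : (w ++ ' ' :: rest).take (w.length + 1) = w ++ [' '] := by
              have := takeSplit 0
              simpa using this
            rw [t0]
            simp
          · simp only [pvC, hdropk, htakek, pvRL_append, hf, hr, hdropArith]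
            rw [show w.length + 1 + l + 1 = w.length + 1 + (l + 1) from by omega, takeSplit (l + 1)]
            simp

theorem pvDelCore_eq_C (cs : List Char) (k : Nat) (hk : k < cs.length) (hc : cs[k]? ≠ some ' ') :
    pvDelCore cs (k : Int) = pvC cs k := by
  unfold pvDelCore
  rw [if_neg (not_not_intro ⟨by omega, by push_cast; omega⟩), PySem.List.pyGet?_natCast, if_neg hc]
  simp only [pvRfindFrom_eval cs k (le_of_lt hk), pvRfind_eq, pvFindFrom_eval cs k (le_of_lt hk),
    PySem.Chars.slice_eq_listSlice]
  rcases hf : pvFF (cs.drop k) with _ | r <;> rcases hr : pvRL (cs.take k) with _ | l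
  · rw [if_neg (by simp), if_neg (by norm_num)]
    simp [pvC, hf, hr]
  · rw [if_neg (by simp), if_pos (by omega : ((l : Int) + 1 > 0)),
      show ((l : Int) + 1 - 1) = ((l : Nat) : Int) from by ring, pvSlice_stop]
    simp [pvC, hf, hr]
  · rw [if_pos (by omega : ((k : Int) + (r : Int) ≠ -1)),
      show (-1 : Int) + 1 = ((0 : Nat) : Int) from by norm_num,
      show (k : Int) + (r : Int) + 1 = ((k + r + 1 : Nat) : Int) from by push_cast; ring,
      pvSlice_stop, pvSlice_start]
    simp [pvC, hf, hr]
  · rw [if_pos (by omega : ((k : Int) + (r : Int) ≠ -1)),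
      show (l : Int) + 1 = ((l + 1 : Nat) : Int) from by push_cast; ring,
      show (k : Int) + (r : Int) + 1 = ((k + r + 1 : Nat) : Int) from by push_cast; ring,
      pvSlice_stop, pvSlice_start]
    simp [pvC, hf, hr]

theorem pvCore_eq (cs : List Char) (idx : Int) :
    pvJoinLoop (pvFindPop (pvSplitSp [] cs) idx 0) = pvDelCore cs idx := by
  by_cases h0 : idx < 0
  · rw [pvFindPop_neg _ h0, pvJoinLoop_splitSp cs [], List.nil_append]
    unfold pvDelCore
    rw [if_pos (by omega)]
  · by_cases h1 : (cs.length : Int) ≤ idx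
    · have hlen : (0 : Int) + ((pvJoinLoop (pvSplitSp [] cs)).length : Int) ≤ idx := by
        rw [pvJoinLoop_splitSp cs []]
        simp only [List.nil_append]
        omega
      rw [pvFindPop_ge _ hlen, pvJoinLoop_splitSp cs [], List.nil_append]
      unfold pvDelCore
      rw [if_pos (by omega)]
    · obtain ⟨k, rfl⟩ : ∃ k : Nat, idx = (k : Int) := ⟨idx.toNat, (Int.toNat_of_nonneg (by omega)).symm⟩
      have hklt : k < cs.length := by omega
      by_cases hsp : cs[k]? = some ' '
      · rw [pvFindPop_space cs.length cs le_rfl k hsp, pvJoinLoop_splitSp cs [], List.nil_append]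
        unfold pvDelCore
        rw [if_neg (not_not_intro ⟨by omega, by push_cast; omega⟩), PySem.List.pyGet?_natCast,
          if_pos hsp]
      · rw [pvMain cs.length cs le_rfl k hklt hsp, pvDelCore_eq_C cs k hklt hsp]

-- ===== VERDICT (by name: the statement is the Claim_ definition above) =====
theorem deleteText_spec : Claim_equal_deleteText := by
  intro article index _
  unfold Spec_deleteText deleteText deleteText_alt
  rw [pvSplitOn_eq, pvCore_eq]
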